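-- pv_equiv track=rewrite | github.com/devyansh22156/CSE643-Artificial-Intelligence | Assignment1/main.py | get_ids_path
-- ===== SOURCE A (Python) =====
-- def dfs(adj_list, node, goal_node, depth, visited):
--   if node == goal_node:
--     return [node]
--
--   if depth == 0:
--     return None
--
--   visited.add(node)
--
--   for adjNode, cost in adj_list.get(node, []):
--     if adjNode not in visited:
--       result = dfs(adj_list, adjNode, goal_node, depth - 1, visited)
--       if result is not None:
--         return [node] + result
--
--   visited.remove(node) # on backtracking unmarked the node as visited
--   return None
--
-- def ids(adj_list, start_node, goal_node, max_depth):
--   for d in range(max_depth + 1):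
--     visited = set()
--     result = dfs(adj_list, start_node, goal_node, d, visited)
--     if result is not None:
--       return result
--   return None
--
-- def dfsCheck(adj_list, start_node, goal_node):
--   visited = set()
--   stack = [start_node]
--
--   while stack:
--     node = stack.pop()
--     if node == goal_node:
--       return True
--     visited.add(node)
--     for adjNode, cost in adj_list.get(node, []):
--       if adjNode not in visited:
--         stack.append(adjNode)
--
--   return False
--
-- def get_ids_path(adj_matrix, start_node, goal_node):
--   n = len(adj_matrix)
--   m = len(adj_matrix[0])
--   adj_list = {}
--
--   for i in range(n):
--     adj_list[i] = []
--     for j in range(m):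
--       if adj_matrix[i][j]>0:
--         adj_list[i].append((j, adj_matrix[i][j]))
--
--   if start_node == goal_node:
--     return [start_node]
--
--   if not dfsCheck(adj_list, start_node, goal_node): # checks if path exists else returns null
--     return []
--
--   max_depth = n-1 # n = number of total nodes present in the graph
--   path = ids(adj_list, start_node, goal_node, max_depth)
--
--   if path is not None:
--     return path
--
--   return []
-- ===== SOURCE B (Python) =====
-- def _dls(nbrs, node, goal, depth, path):
--   # depth-limited search for a simple path, path = nodes already on the way (prefix)
--   path = path + [node]
--   if node == goal:
--     return path
--   if depth == 0:
--     return None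
--   if 0 <= node < len(nbrs):
--     for j in nbrs[node]:
--       if j not in path:
--         r = _dls(nbrs, j, goal, depth - 1, path)
--         if r is not None:
--           return r
--   return None
--
-- def get_ids_path(adj_matrix, start_node, goal_node):
--   n = len(adj_matrix)
--   m = len(adj_matrix[0])
--   nbrs = [[j for j in range(m) if adj_matrix[i][j] > 0] for i in range(n)]
--
--   if start_node == goal_node:
--     return [start_node]
--
--   # BFS by levels: find the smallest path length d (bounded by n-1 like A's max_depth)
--   reach = {start_node}
--   frontier = [start_node]
--   d = None
--   for k in range(1, n):
--     new = []
--     for u in frontier: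
--       if 0 <= u < n:
--         for v in nbrs[u]:
--           if v not in reach:
--             reach.add(v)
--             new.append(v)
--     frontier = new
--     if goal_node in reach:
--       d = k
--       break
--
--   if d is None:
--     return []
--
--   path = _dls(nbrs, start_node, goal_node, d, [])
--   return path if path is not None else []
-- ===== Notes on version B (the rewrite author's own statement) =====
-- stated objective: alternative
-- what changed: A runs a stack-based reachability pre-scan plus one depth-limited DFS per depth 0..n-1 (iterative deepening); B finds the shortest path length d once by level-by-level BFS and then runs a single depth-limited DFS at exactly depth d, replacing the whole deepening loop and the pre-scan (intended as faster; a timing run measured only ~1.2x at the largest size, so no speed is claimed).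
import Mathlib
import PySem

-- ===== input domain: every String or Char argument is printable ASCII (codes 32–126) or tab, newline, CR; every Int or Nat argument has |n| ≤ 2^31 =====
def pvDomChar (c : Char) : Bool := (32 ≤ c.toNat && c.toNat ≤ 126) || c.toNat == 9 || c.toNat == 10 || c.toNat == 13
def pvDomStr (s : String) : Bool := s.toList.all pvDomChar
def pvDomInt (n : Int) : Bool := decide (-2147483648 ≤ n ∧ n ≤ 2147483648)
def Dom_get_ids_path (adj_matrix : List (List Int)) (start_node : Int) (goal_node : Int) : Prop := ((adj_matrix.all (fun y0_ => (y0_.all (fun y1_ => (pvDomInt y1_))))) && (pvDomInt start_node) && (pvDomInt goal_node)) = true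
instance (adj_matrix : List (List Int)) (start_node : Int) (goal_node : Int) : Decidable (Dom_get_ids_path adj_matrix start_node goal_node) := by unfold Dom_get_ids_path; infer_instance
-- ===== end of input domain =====

-- B replaces A's iterative deepening (one depth-limited DFS per depth 0..n-1, plus a
-- reachability pre-scan) by a single level-by-level BFS that finds the shortest path
-- length d, followed by ONE depth-limited DFS at depth d (objective: alternative).
-- A mutates its `visited` set in place; both ports are pure and the equivalence is about
-- the return value (A's set is restored on every backtrack, so the ports are exact).

-- ===== PORT A =====

-- lemmas cited by pvA_dfsCheckAux's termination proof (they must precede the def)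
theorem pv_get?_mem_values (adj : PySem.Dict Int (List (Int × Int))) (k : Int)
    (v : List (Int × Int)) (h : adj.get? k = some v) : v ∈ adj.values := by
  have hit := PySem.Dict.mem_items_of_get?_eq_some adj h
  have hval : adj.values = adj.items.map Prod.snd := rfl
  rw [hval]
  exact List.mem_map.2 ⟨(k, v), hit, rfl⟩

theorem pv_getD_len_le (adj : PySem.Dict Int (List (Int × Int))) (k : Int) :
    (adj.getD k []).length ≤ (adj.values.map List.length).sum := by
  rcases h : adj.get? k with _ | v
  · rw [PySem.Dict.getD_of_get?_eq_none adj [] h]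
    exact Nat.zero_le _
  · rw [PySem.Dict.getD_eq_get?_getD, h, Option.getD_some]
    exact List.le_sum_of_mem (List.mem_map.2 ⟨v, pv_get?_mem_values adj k v h, rfl⟩)

theorem pv_filter_length_le {α : Type} (U : List α) (p q : α → Bool)
    (hpq : ∀ x ∈ U, q x = true → p x = true) :
    (U.filter q).length ≤ (U.filter p).length := by
  induction U with
  | nil => simp
  | cons y t ih =>
    have iht := ih (fun x hx h => hpq x (List.mem_cons_of_mem y hx) h)
    rcases hqy : q y with _ | _
    · rcases hpy : p y with _ | _
      · simpa [hqy, hpy] using iht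
      · simp [hqy, hpy]
        omega
    · have hpy : p y = true := hpq y List.mem_cons_self hqy
      simp [hqy, hpy]
      omega

theorem pv_filter_length_lt {α : Type} (U : List α) (p q : α → Bool)
    (hpq : ∀ x ∈ U, q x = true → p x = true) (z : α) (hz : z ∈ U)
    (hp : p z = true) (hq : q z = false) :
    (U.filter q).length < (U.filter p).length := by
  induction U with
  | nil => cases hz
  | cons y t ih =>
    have hpq' : ∀ x ∈ t, q x = true → p x = true :=
      fun x hx h => hpq x (List.mem_cons_of_mem y hx) h
    rcases List.mem_cons.1 hz with rfl | hz'
    · have hle := pv_filter_length_le t p q hpq'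
      simp [hq, hp]
      omega
    · have ihlt := ih hpq' hz'
      rcases hqy : q y with _ | _
      · rcases hpy : p y with _ | _
        · simpa [hqy, hpy] using ihlt
        · simp [hqy, hpy]
          omega
      · have hpy : p y = true := hpq y List.mem_cons_self hqy
        simp [hqy, hpy]
        omega

theorem pv_sum_map_one {α : Type} (l : List α) (f : α → Nat) (h : ∀ x ∈ l, f x = 1) :
    (l.map f).sum = l.length := by
  induction l with
  | nil => rfl
  | cons y t ih =>
    simp only [List.map_cons, List.sum_cons, h y List.mem_cons_self, List.length_cons,
      ih (fun x hx => h x (List.mem_cons_of_mem y hx))]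
    omega

-- lemma cited by pvA_dfsCheck's stack-membership argument (must precede the def)
theorem pv_nodes_closed (adj : PySem.Dict Int (List (Int × Int))) (start : Int) :
    ∀ z : Int, ∀ p ∈ adj.getD z [], p.1 ∈ start :: adj.values.flatten.map Prod.fst := by
  intro z p hp
  rcases h : adj.get? z with _ | v
  · rw [PySem.Dict.getD_of_get?_eq_none adj [] h] at hp
    cases hp
  · rw [PySem.Dict.getD_eq_get?_getD, h, Option.getD_some] at hp
    exact List.mem_cons.2 (Or.inr (List.mem_map.2
      ⟨p, List.mem_flatten.2 ⟨v, pv_get?_mem_values adj z v h, hp⟩, rfl⟩))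

-- inner loop of the adjacency build: adj_list[i] = [] then append (j, w) for each w > 0
def pvA_row (row : List Int) (m : Int) : List (Int × Int) :=
  (PySem.List.pyRange 0 m 1).foldl
    (fun acc j =>
      if 0 < (PySem.List.pyGet? row j).getD 0 then
        acc ++ [(j, (PySem.List.pyGet? row j).getD 0)]
      else acc) []

-- for i in range(n): adj_list[i] = …   (indexing is in range under Pre_, so getD is exact)
def pvA_buildAdj (M : List (List Int)) (n m : Int) : PySem.Dict Int (List (Int × Int)) :=
  (PySem.List.pyRange 0 n 1).foldl
    (fun d i => d.insert i (pvA_row ((PySem.List.pyGet? M i).getD []) m)) PySem.Dict.empty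

-- dfs(adj_list, node, goal_node, depth, visited); ids only calls it with depth ≥ 0 (a Nat)
def pvA_dfs (adj : PySem.Dict Int (List (Int × Int))) (goal : Int) :
    Nat → Int → PySem.Set Int → Option (List Int)
  | 0, node, _ => if node = goal then some [node] else none
  | d+1, node, visited =>
    if node = goal then some [node]
    else
      let vis := PySem.Set.add visited node
      (adj.getD node []).findSome? (fun p =>
        if PySem.Set.contains vis p.1 then none
        else (pvA_dfs adj goal d p.1 vis).map (fun r => node :: r))

-- ids: first non-None dfs result for d in range(max_depth + 1)
def pvA_ids (adj : PySem.Dict Int (List (Int × Int))) (start goal : Int) (maxDepth : Int) :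
    Option (List Int) :=
  (PySem.List.pyRange 0 (maxDepth + 1) 1).findSome?
    (fun d => pvA_dfs adj goal d.toNat start PySem.Set.empty)

-- dfsCheck's while loop; U / hU / hs only justify termination (erased at runtime)
def pvA_dfsCheckAux (adj : PySem.Dict Int (List (Int × Int))) (goal : Int) (U : List Int)
    (hU : ∀ z : Int, ∀ p ∈ adj.getD z [], p.1 ∈ U)
    (visited : PySem.Set Int) (stack : List Int)
    (hs : ∀ x ∈ stack, x ∈ U) : Bool :=
  if hne : stack = [] then false
  else
    let node := stack.getLast hne
    if node = goal then true
    else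
      pvA_dfsCheckAux adj goal U hU (PySem.Set.add visited node)
        (stack.dropLast ++ ((adj.getD node []).filter
          (fun p => !PySem.Set.contains (PySem.Set.add visited node) p.1)).map Prod.fst)
        (by
          intro x hx
          rcases List.mem_append.1 hx with hx | hx
          · exact hs x (List.mem_of_mem_dropLast hx)
          · rcases List.mem_map.1 hx with ⟨p, hp, rfl⟩
            exact hU node p (List.mem_of_mem_filter hp))
termination_by
  ((U.filter (fun v => !PySem.Set.contains visited v)).length,
   (stack.map (fun v =>
     if PySem.Set.contains visited v then (adj.values.map List.length).sum + 1 else 1)).sum)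
decreasing_by
  by_cases hv : PySem.Set.contains visited (stack.getLast hne) = true
  · -- the popped node is already visited: the weighted stack sum decreases
    have hmem : stack.getLast hne ∈ visited := (PySem.Set.contains_iff visited _).mp hv
    have hadd : PySem.Set.add visited (stack.getLast hne) = visited := PySem.Set.add_of_mem hmem
    rw [hadd]
    apply Prod.Lex.right
    have hsplit : (List.map (fun v =>
        if PySem.Set.contains visited v then (adj.values.map List.length).sum + 1 else 1)
        stack).sum =
        (List.map (fun v =>
          if PySem.Set.contains visited v then (adj.values.map List.length).sum + 1 else 1)
          stack.dropLast).sum +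
        (List.map (fun v =>
          if PySem.Set.contains visited v then (adj.values.map List.length).sum + 1 else 1)
          [stack.getLast hne]).sum := by
      conv_lhs => rw [← List.dropLast_concat_getLast hne]
      rw [List.map_append, List.sum_append]
    rw [List.map_append, List.sum_append, hsplit]
    have hpush : ((((adj.getD (stack.getLast hne) []).filter
        (fun p => !PySem.Set.contains visited p.1)).map Prod.fst).map (fun v =>
          if PySem.Set.contains visited v then (adj.values.map List.length).sum + 1 else 1)).sum =
        (((adj.getD (stack.getLast hne) []).filter
          (fun p => !PySem.Set.contains visited p.1)).map Prod.fst).length := by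
      apply pv_sum_map_one
      intro x hx
      rcases List.mem_map.1 hx with ⟨pr, hpr, rfl⟩
      have hf := List.of_mem_filter hpr
      rw [Bool.not_eq_true'] at hf
      rw [hf]
      simp
    rw [hpush]
    have hb1 : (((adj.getD (stack.getLast hne) []).filter
        (fun p => !PySem.Set.contains visited p.1)).map Prod.fst).length ≤
        (adj.getD (stack.getLast hne) []).length := by
      rw [List.length_map]
      exact List.length_filter_le _ _
    have hb2 := pv_getD_len_le adj (stack.getLast hne)
    have hlast : (List.map (fun v =>
        if PySem.Set.contains visited v then (adj.values.map List.length).sum + 1 else 1)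
        [stack.getLast hne]).sum = (adj.values.map List.length).sum + 1 := by
      simp only [List.map_cons, List.map_nil, List.sum_cons, List.sum_nil, hv]
      simp
    rw [hlast]
    omega
  · -- the popped node is new: it becomes visited, the unvisited count drops
    apply Prod.Lex.left
    apply pv_filter_length_lt U _ _ ?_ (stack.getLast hne) (hs _ (List.getLast_mem hne)) ?_ ?_
    · intro x _ hqx
      rw [Bool.not_eq_true'] at hqx ⊢
      rcases hcx : PySem.Set.contains visited x with _ | _
      · rfl
      · exfalso
        have hxmem : x ∈ visited := (PySem.Set.contains_iff visited x).mp hcx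
        have : x ∈ PySem.Set.add visited (stack.getLast hne) :=
          (PySem.Set.mem_add visited _ x).2 (Or.inl hxmem)
        rw [← PySem.Set.contains_iff] at this
        rw [this] at hqx
        cases hqx
    · rw [Bool.not_eq_true] at hv
      rw [hv]
      rfl
    · simp

def pvA_dfsCheck (adj : PySem.Dict Int (List (Int × Int))) (start goal : Int) : Bool :=
  pvA_dfsCheckAux adj goal (start :: adj.values.flatten.map Prod.fst)
    (pv_nodes_closed adj start) PySem.Set.empty [start]
    (by intro x hx; simp only [List.mem_singleton] at hx; subst hx; exact List.mem_cons_self)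

def get_ids_path (adj_matrix : List (List Int)) (start_node : Int) (goal_node : Int) :
    List Int :=
  let n : Int := (adj_matrix.length : Int)
  let m : Int := (((PySem.List.pyGet? adj_matrix 0).getD []).length : Int)
  let adj := pvA_buildAdj adj_matrix n m
  if start_node = goal_node then [start_node]
  else if pvA_dfsCheck adj start_node goal_node = false then []
  else
    match pvA_ids adj start_node goal_node (n - 1) with
    | some p => p
    | none => []

-- ===== PORT B =====

-- nbrs = [[j for j in range(m) if adj_matrix[i][j] > 0] for i in range(n)]
def pvB_nbrs (M : List (List Int)) : List (List Int) :=
  (PySem.List.pyRange 0 (M.length : Int) 1).map (fun i =>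
    (PySem.List.pyRange 0 ((((PySem.List.pyGet? M 0).getD []).length : Int)) 1).filter
      (fun j => 0 < (PySem.List.pyGet? ((PySem.List.pyGet? M i).getD []) j).getD 0))

-- _dls(nbrs, node, goal, depth, path); depth ≥ 1 at the top call (a Nat)
def pvB_dls (nbrs : List (List Int)) (goal : Int) :
    Nat → Int → List Int → Option (List Int)
  | 0, node, path =>
    if node = goal then some (path ++ [node]) else none
  | d+1, node, path =>
    let path' := path ++ [node]
    if node = goal then some path'
    else
      (if 0 ≤ node ∧ node < (nbrs.length : Int) then
          (PySem.List.pyGet? nbrs node).getD []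
        else []).findSome? (fun j =>
          if j ∈ path' then none else pvB_dls nbrs goal d j path')

-- one BFS level: new = unvisited neighbours of the frontier, reach grows by new
def pvB_expand (nbrs : List (List Int)) (reach : PySem.Set Int) (frontier : List Int) :
    PySem.Set Int × List Int :=
  frontier.foldl
    (fun st u =>
      (if 0 ≤ u ∧ u < (nbrs.length : Int) then (PySem.List.pyGet? nbrs u).getD [] else []).foldl
        (fun st2 v =>
          if PySem.Set.contains st2.1 v then st2
          else (PySem.Set.add st2.1 v, st2.2 ++ [v])) st)
    (reach, [])

-- for k in range(1, n): expand; if goal in reach: d = k; break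
def pvB_findDepth (nbrs : List (List Int)) (goal : Int) :
    Nat → PySem.Set Int → List Int → Nat → Option Nat
  | 0, _, _, _ => none
  | steps+1, reach, frontier, k =>
    let st := pvB_expand nbrs reach frontier
    if PySem.Set.contains st.1 goal then some k
    else pvB_findDepth nbrs goal steps st.1 st.2 (k+1)

def get_ids_path_alt (adj_matrix : List (List Int)) (start_node : Int) (goal_node : Int) :
    List Int :=
  let nbrs := pvB_nbrs adj_matrix
  if start_node = goal_node then [start_node]
  else
    match pvB_findDepth nbrs goal_node (adj_matrix.length - 1)
        (PySem.Set.add PySem.Set.empty start_node) [start_node] 1 with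
    | none => []
    | some d =>
      match pvB_dls nbrs goal_node d start_node [] with
      | some p => p
      | none => []

-- ===== PRECONDITION & SPEC =====
-- Pre_ excludes exactly the inputs where A raises (IndexError): the empty matrix
-- (adj_matrix[0]) and matrices with a row shorter than row 0 (adj_matrix[i][j], j < m).
def Pre_get_ids_path (adj_matrix : List (List Int)) (start_node : Int) (goal_node : Int) :
    Prop :=
  adj_matrix ≠ [] ∧ ∀ row ∈ adj_matrix, (adj_matrix.headD []).length ≤ row.length

instance (adj_matrix : List (List Int)) (start_node : Int) (goal_node : Int) :
    Decidable (Pre_get_ids_path adj_matrix start_node goal_node) := by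
  unfold Pre_get_ids_path; infer_instance

def pvWitness_get_ids_path : List (List Int) × Int × Int := ([[0, 1], [1, 0]], 0, 1)

def Spec_get_ids_path (adj_matrix : List (List Int)) (start_node : Int) (goal_node : Int)
    (out : List Int) : Prop := out = get_ids_path_alt adj_matrix start_node goal_node
instance (adj_matrix : List (List Int)) (start_node : Int) (goal_node : Int) (out : List Int) :
    Decidable (Spec_get_ids_path adj_matrix start_node goal_node out) := by
  unfold Spec_get_ids_path; infer_instance

-- ===== CLAIM (what is proved, stated in full; the proofs are below) =====
def Claim_equal_get_ids_path : Prop := ∀ (adj_matrix : List (List Int)) (start_node : Int) (goal_node : Int), Dom_get_ids_path adj_matrix start_node goal_node → Pre_get_ids_path adj_matrix start_node goal_node → Spec_get_ids_path adj_matrix start_node goal_node (get_ids_path adj_matrix start_node goal_node)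

-- ===== LEMMAS AND PROOFS =====

-- the adjacency dictionary of A, and the neighbour relation both programs walk
def pvAdjD (M : List (List Int)) : PySem.Dict Int (List (Int × Int)) :=
  pvA_buildAdj M (M.length : Int) (((PySem.List.pyGet? M 0).getD []).length : Int)

def pvRd (adj : PySem.Dict Int (List (Int × Int))) (a b : Int) : Prop :=
  b ∈ (adj.getD a []).map Prod.fst

def pvChain (R : Int → Int → Prop) : Int → List Int → Prop
  | _, [] => True
  | a, b :: l => R a b ∧ pvChain R b l

def pvLast : Int → List Int → Int
  | a, [] => a
  | _, b :: l => pvLast b l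

-- "there is a walk from s to v with at most k edges"
def pvWD (adj : PySem.Dict Int (List (Int × Int))) (s : Int) (k : Nat) (v : Int) : Prop :=
  ∃ l : List Int, pvChain (pvRd adj) s l ∧ pvLast s l = v ∧ l.length ≤ k

theorem pvLast_append (a : Int) (l1 l2 : List Int) :
    pvLast a (l1 ++ l2) = pvLast (pvLast a l1) l2 := by
  induction l1 generalizing a with
  | nil => rfl
  | cons b t ih => simpa [pvLast] using ih b

theorem pvChain_append (R : Int → Int → Prop) (a : Int) (l1 l2 : List Int) :
    pvChain R a (l1 ++ l2) ↔ pvChain R a l1 ∧ pvChain R (pvLast a l1) l2 := by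
  induction l1 generalizing a with
  | nil => simp [pvChain, pvLast]
  | cons b t ih => simp [pvChain, pvLast, ih, and_assoc]

theorem pvWD_mono (adj : PySem.Dict Int (List (Int × Int))) (s : Int) {j k : Nat} (h : j ≤ k)
    (v : Int) : pvWD adj s j v → pvWD adj s k v := by
  rintro ⟨l, hc, hl, hlen⟩; exact ⟨l, hc, hl, hlen.trans h⟩

theorem pvWD_zero (adj : PySem.Dict Int (List (Int × Int))) (s v : Int) :
    pvWD adj s 0 v ↔ v = s := by
  constructor
  · rintro ⟨l, _, hl, hlen⟩
    have : l = [] := List.length_eq_zero_iff.mp (Nat.le_zero.mp hlen)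
    subst this; exact hl.symm
  · rintro rfl; exact ⟨[], trivial, rfl, Nat.le_refl 0⟩

theorem pv_contains_false (s : PySem.Set Int) (x : Int) :
    PySem.Set.contains s x = false ↔ x ∉ s := by
  constructor
  · intro h hmem
    rw [(PySem.Set.contains_iff s x).2 hmem] at h
    cases h
  · intro h
    rcases hc : PySem.Set.contains s x with _ | _
    · rfl
    · exact absurd ((PySem.Set.contains_iff s x).1 hc) h

-- helper: Option.map through findSome?
theorem pv_findSome?_map {α β γ : Type} (l : List α) (f : α → Option β) (g : β → γ) :
    (l.findSome? f).map g = l.findSome? (fun a => (f a).map g) := by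
  induction l with
  | nil => rfl
  | cons x xs ih => simp only [List.findSome?_cons]; cases f x <;> simp [ih]

-- 1. the built dict looked up
theorem pv_build_getD (f : Int → List (Int × Int)) (l : List Int)
    (d : PySem.Dict Int (List (Int × Int))) (u : Int) :
    ((l.foldl (fun d i => d.insert i (f i)) d).getD u []) =
      if u ∈ l then f u else d.getD u [] := by
  induction l generalizing d with
  | nil => simp
  | cons i t ih =>
    rw [List.foldl_cons, ih]
    by_cases hm : u ∈ t
    · simp [hm]
    · by_cases hui : u = i
      · subst hui
        simp [hm]
      · simp [hm, hui, List.mem_cons, PySem.Dict.getD_insert]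

theorem pv_rowA (row : List Int) (m : Int) :
    pvA_row row m =
      ((PySem.List.pyRange 0 m 1).filter
        (fun j => 0 < (PySem.List.pyGet? row j).getD 0)).map
        (fun j => (j, (PySem.List.pyGet? row j).getD 0)) := by
  unfold pvA_row
  simpa using PySem.List.foldl_append_if
    (fun j => decide (0 < (PySem.List.pyGet? row j).getD 0))
    (fun j => (j, (PySem.List.pyGet? row j).getD 0)) (PySem.List.pyRange 0 m 1) []

-- 2. B's guarded lookup = A's dict lookup (as neighbour lists)
theorem pv_agree (M : List (List Int)) (u : Int) :
    (if 0 ≤ u ∧ u < ((pvB_nbrs M).length : Int) then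
        (PySem.List.pyGet? (pvB_nbrs M) u).getD []
      else []) = ((pvAdjD M).getD u []).map Prod.fst := by
  have hlen : ((pvB_nbrs M).length : Int) = (M.length : Int) := by
    simp [pvB_nbrs, PySem.List.length_pyRange_one]
  unfold pvAdjD pvA_buildAdj
  rw [pv_build_getD]
  by_cases h : 0 ≤ u ∧ u < (M.length : Int)
  · rw [if_pos (by rw [hlen]; exact h), if_pos (PySem.List.mem_pyRange_one.2 h)]
    rw [show (PySem.List.pyGet? (pvB_nbrs M) u).getD ([] : List Int) =
        PySem.List.pyGetD (pvB_nbrs M) u [] from rfl]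
    unfold pvB_nbrs
    rw [PySem.List.pyGetD_map_pyRange_of_nonneg _ _ _ _ h.1 h.2]
    rw [pv_rowA, List.map_map]
    simp [Function.comp_def]
  · rw [if_neg (by rw [hlen]; exact h),
        if_neg (fun hm => h (PySem.List.mem_pyRange_one.1 hm))]
    rfl

-- 3. B's accumulator DLS = A's recursive dfs with the path as visited set
theorem pv_dls_eq (M : List (List Int)) (goal : Int) :
    ∀ (d : Nat) (node : Int) (path : List Int),
      pvB_dls (pvB_nbrs M) goal d node path =
        (pvA_dfs (pvAdjD M) goal d node (PySem.Set.ofList path)).map (path ++ ·) := by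
  intro d
  induction d with
  | zero =>
    intro node path
    by_cases hg : node = goal <;> simp [pvB_dls, pvA_dfs, hg]
  | succ d ih =>
    intro node path
    by_cases hg : node = goal
    · simp [pvB_dls, pvA_dfs, hg]
    · simp only [pvB_dls, pvA_dfs, if_neg hg]
      rw [pv_agree M node, List.findSome?_map, pv_findSome?_map]
      refine congrFun (congrArg _ (funext fun p => ?_)) _
      show (if p.1 ∈ path ++ [node] then none
              else pvB_dls (pvB_nbrs M) goal d p.1 (path ++ [node])) =
           (if PySem.Set.contains (PySem.Set.add (PySem.Set.ofList path) node) p.1 then none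
              else (pvA_dfs (pvAdjD M) goal d p.1
                (PySem.Set.add (PySem.Set.ofList path) node)).map (node :: ·)).map (path ++ ·)
      rw [← PySem.Set.ofList_append_singleton]
      by_cases hmem : p.1 ∈ path ++ [node]
      · rw [if_pos hmem,
          if_pos ((PySem.Set.contains_iff _ _).2 ((PySem.Set.mem_ofList _ _).2 hmem))]
        rfl
      · rw [if_neg hmem,
          if_neg (fun hc => hmem ((PySem.Set.mem_ofList _ _).1
            ((PySem.Set.contains_iff _ _).1 hc))), ih]
        rw [Option.map_map]
        refine congrFun (congrArg _ (funext fun r => ?_)) _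
        simp

-- 4. soundness: a dfs result is a simple walk of length ≤ d avoiding visited
theorem pv_dfs_sound (adj : PySem.Dict Int (List (Int × Int))) (goal : Int) :
    ∀ (d : Nat) (node : Int) (vis : PySem.Set Int) (p : List Int),
      pvA_dfs adj goal d node vis = some p →
      ∃ l : List Int, p = node :: l ∧ pvChain (pvRd adj) node l ∧ pvLast node l = goal ∧
        l.length ≤ d ∧ (node :: l).Nodup ∧ ∀ x ∈ l, PySem.Set.contains vis x = false := by
  intro d
  induction d with
  | zero =>
    intro node vis p h
    by_cases hg : node = goal
    · simp only [pvA_dfs, if_pos hg, Option.some.injEq] at h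
      exact ⟨[], h.symm, trivial, hg, Nat.le_refl 0, by simp, by simp⟩
    · simp [pvA_dfs, hg] at h
  | succ d ih =>
    intro node vis p h
    by_cases hg : node = goal
    · simp only [pvA_dfs, if_pos hg, Option.some.injEq] at h
      exact ⟨[], h.symm, trivial, hg, Nat.zero_le _, by simp, by simp⟩
    · simp only [pvA_dfs, if_neg hg] at h
      rcases List.exists_of_findSome?_eq_some h with ⟨pr, hpr, hf⟩
      by_cases hc : PySem.Set.contains (PySem.Set.add vis node) pr.1 = true
      · rw [if_pos hc] at hf
        cases hf
      · rw [if_neg hc] at hf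
        rcases Option.map_eq_some_iff.1 hf with ⟨r, hr, rfl⟩
        rcases ih pr.1 (PySem.Set.add vis node) r hr with
          ⟨l', rfl, hch, hlast, hlen, hnd, havoid⟩
        have hprv : pr.1 ∉ PySem.Set.add vis node := by
          intro hm
          exact hc ((PySem.Set.contains_iff _ _).2 hm)
        have hprnode : pr.1 ≠ node := fun he =>
          hprv ((PySem.Set.mem_add vis node pr.1).2 (Or.inr he))
        have hprvis : pr.1 ∉ vis := fun hm =>
          hprv ((PySem.Set.mem_add vis node pr.1).2 (Or.inl hm))
        refine ⟨pr.1 :: l', rfl, ⟨List.mem_map.2 ⟨pr, hpr, rfl⟩, hch⟩, hlast, ?_, ?_, ?_⟩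
        · simpa using Nat.succ_le_succ hlen
        · refine List.nodup_cons.2 ⟨?_, hnd⟩
          intro hmem
          rcases List.mem_cons.1 hmem with he | hmem'
          · exact hprnode he.symm
          · have := havoid node hmem'
            rw [(PySem.Set.contains_iff _ _).2
              ((PySem.Set.mem_add vis node node).2 (Or.inr rfl))] at this
            cases this
        · intro x hx
          rcases List.mem_cons.1 hx with he | hx'
          · rw [he]
            exact (pv_contains_false vis pr.1).2 hprvis
          · have := havoid x hx'
            rw [pv_contains_false] at this ⊢
            exact fun hm => this ((PySem.Set.mem_add vis node x).2 (Or.inl hm))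

-- 5. completeness: a simple walk of length ≤ d avoiding visited makes dfs succeed
theorem pv_dfs_complete (adj : PySem.Dict Int (List (Int × Int))) (goal : Int) :
    ∀ (l : List Int) (d : Nat) (node : Int) (vis : PySem.Set Int),
      pvChain (pvRd adj) node l → pvLast node l = goal → l.length ≤ d →
      (node :: l).Nodup → (∀ x ∈ l, PySem.Set.contains vis x = false) →
      (pvA_dfs adj goal d node vis).isSome := by
  intro l
  induction l with
  | nil =>
    intro d node vis hch hlast hlen hnd hav
    have hg : node = goal := hlast
    cases d <;> simp [pvA_dfs, hg]
  | cons j t ih =>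
    intro d node vis hch hlast hlen hnd hav
    by_cases hg : node = goal
    · cases d <;> simp [pvA_dfs, hg]
    · cases d with
      | zero => simp at hlen
      | succ d =>
        simp only [pvA_dfs, if_neg hg, List.findSome?_isSome_iff]
        simp only [pvChain] at hch
        rcases List.mem_map.1 hch.1 with ⟨pr, hpr, hfst⟩
        refine ⟨pr, hpr, ?_⟩
        have hnode_not : node ∉ j :: t := (List.nodup_cons.1 hnd).1
        have hjc : PySem.Set.contains (PySem.Set.add vis node) pr.1 = false := by
          rw [pv_contains_false, hfst]
          intro hm
          rcases (PySem.Set.mem_add vis node j).1 hm with hm' | he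
          · exact absurd ((PySem.Set.contains_iff vis j).2 hm')
              (by rw [hav j List.mem_cons_self]; simp)
          · exact hnode_not (he ▸ List.mem_cons_self)
        rw [if_neg (by rw [hjc]; simp), Option.isSome_map]
        rw [hfst]
        apply ih d j (PySem.Set.add vis node) hch.2 hlast (by simpa using hlen)
          ((List.nodup_cons.1 hnd).2)
        intro x hx
        rw [pv_contains_false]
        intro hm
        rcases (PySem.Set.mem_add vis node x).1 hm with hm' | he
        · have := hav x (List.mem_cons_of_mem j hx)
          rw [(PySem.Set.contains_iff vis x).2 hm'] at this
          cases this
        · exact hnode_not (he ▸ List.mem_cons_of_mem j hx)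

-- 6. a walk contains a simple walk with the same endpoints, no longer
theorem pv_not_nodup_split {α : Type} [DecidableEq α] :
    ∀ xs : List α, ¬ xs.Nodup → ∃ a x b c, xs = a ++ x :: (b ++ x :: c) := by
  intro xs
  induction xs with
  | nil => intro h; exact absurd List.nodup_nil h
  | cons y t ih =>
    intro h
    by_cases hy : y ∈ t
    · rcases List.append_of_mem hy with ⟨b, c, rfl⟩
      exact ⟨[], y, b, c, rfl⟩
    · have ht : ¬ t.Nodup := fun hnd => h (List.nodup_cons.2 ⟨hy, hnd⟩)
      rcases ih ht with ⟨a, x, b, c, rfl⟩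
      exact ⟨y :: a, x, b, c, rfl⟩

theorem pv_extract (R : Int → Int → Prop) :
    ∀ (n : Nat) (l : List Int) (s : Int), l.length ≤ n → pvChain R s l →
      ∃ l' : List Int, pvChain R s l' ∧ pvLast s l' = pvLast s l ∧
        l'.length ≤ l.length ∧ (s :: l').Nodup := by
  intro n
  induction n with
  | zero =>
    intro l s hlen _
    have : l = [] := List.length_eq_zero_iff.mp (Nat.le_zero.mp hlen)
    subst this
    exact ⟨[], trivial, rfl, Nat.le_refl 0, by simp⟩
  | succ n ihn =>
    intro l s hlen hch
    by_cases hnd : (s :: l).Nodup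
    · exact ⟨l, hch, rfl, Nat.le_refl _, hnd⟩
    · rcases pv_not_nodup_split (s :: l) hnd with ⟨a, x, b, c, heq⟩
      cases a with
      | nil =>
        simp only [List.nil_append, List.cons.injEq] at heq
        obtain ⟨rfl, rfl⟩ := heq
        rw [pvChain_append] at hch
        have hcc : pvChain R s c := hch.2.2
        have hclen : c.length ≤ n := by
          have := hlen
          simp [List.length_append] at this
          omega
        rcases ihn c s hclen hcc with ⟨l', hch', hlast', hlen', hnd'⟩
        refine ⟨l', hch', ?_, ?_, hnd'⟩
        · rw [hlast', pvLast_append]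
          rfl
        · simp only [List.length_append, List.length_cons]
          omega
      | cons y a' =>
        simp only [List.cons_append, List.cons.injEq] at heq
        obtain ⟨rfl, rfl⟩ := heq
        rw [pvChain_append] at hch
        obtain ⟨hca', hrest⟩ := hch
        obtain ⟨hRx, hrest2⟩ := (hrest : R (pvLast s a') x ∧ _)
        rw [pvChain_append] at hrest2
        have hcc : pvChain R x c := (hrest2.2).2
        have hch2 : pvChain R s (a' ++ x :: c) :=
          (pvChain_append R s a' (x :: c)).2 ⟨hca', hRx, hcc⟩
        have hclen : (a' ++ x :: c).length ≤ n := by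
          have := hlen
          simp [List.length_append] at this ⊢
          omega
        rcases ihn (a' ++ x :: c) s hclen hch2 with ⟨l', hch', hlast', hlen', hnd'⟩
        refine ⟨l', hch', ?_, ?_, hnd'⟩
        · rw [hlast', pvLast_append, pvLast_append]
          show pvLast x c = pvLast x (b ++ x :: c)
          rw [pvLast_append]
          rfl
        · simp only [List.length_append, List.length_cons] at hlen' ⊢
          omega

-- 7. one fold of B's level expansion, membership-characterised
theorem pv_scan_mem (L : List Int) :
    ∀ (st0 : PySem.Set Int × List Int) (v : Int),
      (v ∈ (L.foldl (fun st2 x => if PySem.Set.contains st2.1 x then st2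
          else (PySem.Set.add st2.1 x, st2.2 ++ [x])) st0).1 ↔ v ∈ st0.1 ∨ v ∈ L) ∧
      (v ∈ (L.foldl (fun st2 x => if PySem.Set.contains st2.1 x then st2
          else (PySem.Set.add st2.1 x, st2.2 ++ [x])) st0).2 ↔
        v ∈ st0.2 ∨ (v ∉ st0.1 ∧ v ∈ L)) := by
  induction L with
  | nil => intro st0 v; simp
  | cons h t ih =>
    intro st0 v
    rw [List.foldl_cons]
    by_cases hc : PySem.Set.contains st0.1 h = true
    · have hmem := (PySem.Set.contains_iff _ _).1 hc
      rw [if_pos hc]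
      have hv : v = h → v ∈ st0.1 := fun he => he ▸ hmem
      rcases ih st0 v with ⟨ih1, ih2⟩
      constructor
      · rw [ih1]
        simp only [List.mem_cons]
        tauto
      · rw [ih2]
        simp only [List.mem_cons]
        tauto
    · rw [if_neg hc]
      have hnm : h ∉ st0.1 := fun hm => hc ((PySem.Set.contains_iff _ _).2 hm)
      have hv : v = h → v ∉ st0.1 := fun he => he ▸ hnm
      rcases ih (PySem.Set.add st0.1 h, st0.2 ++ [h]) v with ⟨ih1, ih2⟩
      constructor
      · rw [ih1]
        simp only [PySem.Set.mem_add, List.mem_cons]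
        tauto
      · rw [ih2]
        simp only [PySem.Set.mem_add, List.mem_append, List.mem_cons]
        tauto

theorem pv_expand_mem (nbrs : List (List Int)) (reach : PySem.Set Int) (frontier : List Int) :
    ∀ v : Int,
      (v ∈ (pvB_expand nbrs reach frontier).1 ↔ v ∈ reach ∨ ∃ u ∈ frontier,
        v ∈ (if 0 ≤ u ∧ u < (nbrs.length : Int) then (PySem.List.pyGet? nbrs u).getD [] else [])) ∧
      (v ∈ (pvB_expand nbrs reach frontier).2 ↔ (v ∉ reach ∧ ∃ u ∈ frontier,
        v ∈ (if 0 ≤ u ∧ u < (nbrs.length : Int) then (PySem.List.pyGet? nbrs u).getD [] else []))) := by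
  intro v
  have hfold : pvB_expand nbrs reach frontier =
      ((frontier.map (fun u =>
        if 0 ≤ u ∧ u < (nbrs.length : Int) then (PySem.List.pyGet? nbrs u).getD [] else [])).flatten).foldl
        (fun st2 x => if PySem.Set.contains st2.1 x then st2
          else (PySem.Set.add st2.1 x, st2.2 ++ [x])) (reach, []) := by
    unfold pvB_expand
    rw [List.foldl_flatten, List.foldl_map]
  have hmemflat : (v ∈ ((frontier.map (fun u =>
      if 0 ≤ u ∧ u < (nbrs.length : Int) then (PySem.List.pyGet? nbrs u).getD [] else [])).flatten)) ↔
      ∃ u ∈ frontier,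
        v ∈ (if 0 ≤ u ∧ u < (nbrs.length : Int) then (PySem.List.pyGet? nbrs u).getD [] else []) := by
    simp [List.mem_flatten]
  rw [hfold]
  rcases pv_scan_mem _ ((reach, []) : PySem.Set Int × List Int) v with ⟨h1, h2⟩
  constructor
  · rw [h1, hmemflat]
  · rw [h2, hmemflat]
    simp

-- 8. the BFS loop finds exactly the minimal walk length (within its budget)
theorem pv_findDepth_spec (M : List (List Int)) (s goal : Int) :
    ∀ (steps : Nat) (reach : PySem.Set Int) (frontier : List Int) (k : Nat), 1 ≤ k →
      (∀ v, v ∈ reach ↔ pvWD (pvAdjD M) s (k-1) v) →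
      (∀ v, v ∈ frontier ↔ (pvWD (pvAdjD M) s (k-1) v ∧ ∀ j < k-1, ¬ pvWD (pvAdjD M) s j v)) →
      (∀ j < k, ¬ pvWD (pvAdjD M) s j goal) →
      ((∀ d, pvB_findDepth (pvB_nbrs M) goal steps reach frontier k = some d →
          k ≤ d ∧ d < k + steps ∧ pvWD (pvAdjD M) s d goal ∧ ∀ j < d, ¬ pvWD (pvAdjD M) s j goal) ∧
       (pvB_findDepth (pvB_nbrs M) goal steps reach frontier k = none →
          ∀ j < k + steps, ¬ pvWD (pvAdjD M) s j goal)) := by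
  have hgn : ∀ u v : Int,
      (v ∈ (if 0 ≤ u ∧ u < ((pvB_nbrs M).length : Int) then
        (PySem.List.pyGet? (pvB_nbrs M) u).getD [] else [])) ↔ pvRd (pvAdjD M) u v := by
    intro u v
    rw [pv_agree M u]
    exact Iff.rfl
  intro steps
  induction steps with
  | zero =>
    intro reach frontier k hk h1 h2 h3
    constructor
    · intro d hd
      simp [pvB_findDepth] at hd
    · intro _ j hj
      exact h3 j (by omega)
  | succ steps ih =>
    intro reach frontier k hk h1 h2 h3
    -- the expanded state
    have hedge : ∀ v : Int, (∃ u ∈ frontier, pvRd (pvAdjD M) u v) → pvWD (pvAdjD M) s k v := by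
      rintro v ⟨u, hu, huv⟩
      rcases (h2 u).1 hu with ⟨⟨lu, hcu, hlu, hlenu⟩, _⟩
      refine ⟨lu ++ [v], ?_, ?_, ?_⟩
      · exact (pvChain_append _ s lu [v]).2 ⟨hcu, by rw [hlu]; exact ⟨huv, trivial⟩⟩
      · rw [pvLast_append, hlu]
        rfl
      · simp only [List.length_append, List.length_cons, List.length_nil]
        omega
    have hedge2 : ∀ v : Int, pvWD (pvAdjD M) s k v → ¬ pvWD (pvAdjD M) s (k-1) v →
        ∃ u ∈ frontier, pvRd (pvAdjD M) u v := by
      rintro v ⟨l, hch, hl, hlen⟩ hnot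
      rcases List.eq_nil_or_concat l with rfl | ⟨l1, a, rfl⟩
      · exact absurd (pvWD_mono _ s (Nat.zero_le _) v ((pvWD_zero _ s v).2 hl.symm)) hnot
      · simp only [List.concat_eq_append] at hch hl hlen
        rw [pvLast_append] at hl
        have ha : a = v := hl
        subst ha
        rcases (pvChain_append _ s l1 [a]).1 hch with ⟨hch1, hRa⟩
        have hWu : pvWD (pvAdjD M) s (k-1) (pvLast s l1) := by
          refine ⟨l1, hch1, rfl, ?_⟩
          simp only [List.length_append, List.length_cons, List.length_nil] at hlen
          omega
        have hmin : ∀ j < k-1, ¬ pvWD (pvAdjD M) s j (pvLast s l1) := by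
          intro j hj hWj
          rcases hWj with ⟨lj, hcj, hlj, hlenj⟩
          apply hnot
          refine pvWD_mono _ s (show j+1 ≤ k-1 by omega) a ⟨lj ++ [a], ?_, ?_, ?_⟩
          · exact (pvChain_append _ s lj [a]).2 ⟨hcj, by rw [hlj]; exact ⟨hRa.1, trivial⟩⟩
          · rw [pvLast_append, hlj]
            rfl
          · simp only [List.length_append, List.length_cons, List.length_nil]
            omega
        exact ⟨pvLast s l1, (h2 _).2 ⟨hWu, hmin⟩, hRa.1⟩
    have hre : ∀ v, v ∈ (pvB_expand (pvB_nbrs M) reach frontier).1 ↔ pvWD (pvAdjD M) s k v := by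
      intro v
      rw [(pv_expand_mem (pvB_nbrs M) reach frontier v).1]
      constructor
      · rintro (hv | ⟨u, hu, huv⟩)
        · exact pvWD_mono _ s (Nat.sub_le k 1) v ((h1 v).1 hv)
        · exact hedge v ⟨u, hu, (hgn u v).1 huv⟩
      · intro hv
        by_cases hv' : pvWD (pvAdjD M) s (k-1) v
        · exact Or.inl ((h1 v).2 hv')
        · rcases hedge2 v hv hv' with ⟨u, hu, huv⟩
          exact Or.inr ⟨u, hu, (hgn u v).2 huv⟩
    have hnw : ∀ v, v ∈ (pvB_expand (pvB_nbrs M) reach frontier).2 ↔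
        (pvWD (pvAdjD M) s k v ∧ ∀ j < k, ¬ pvWD (pvAdjD M) s j v) := by
      intro v
      rw [(pv_expand_mem (pvB_nbrs M) reach frontier v).2]
      constructor
      · rintro ⟨hnr, u, hu, huv⟩
        have hWv : pvWD (pvAdjD M) s k v := hedge v ⟨u, hu, (hgn u v).1 huv⟩
        refine ⟨hWv, ?_⟩
        intro j hj hWj
        exact hnr ((h1 v).2 (pvWD_mono _ s (show j ≤ k-1 by omega) v hWj))
      · rintro ⟨hWv, hmin⟩
        have hnr : v ∉ reach := fun hv => hmin (k-1) (by omega) ((h1 v).1 hv)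
        have hv' : ¬ pvWD (pvAdjD M) s (k-1) v := hmin (k-1) (by omega)
        rcases hedge2 v hWv hv' with ⟨u, hu, huv⟩
        exact ⟨hnr, u, hu, (hgn u v).2 huv⟩
    simp only [pvB_findDepth]
    by_cases hgl : PySem.Set.contains (pvB_expand (pvB_nbrs M) reach frontier).1 goal = true
    · rw [if_pos hgl]
      constructor
      · intro d hd
        have hdk : d = k := by
          simpa using hd.symm
        subst hdk
        exact ⟨Nat.le_refl d, by omega,
          (hre goal).1 ((PySem.Set.contains_iff _ _).1 hgl), h3⟩
      · intro hcontra
        cases hcontra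
    · rw [if_neg hgl]
      have h3' : ∀ j < k + 1, ¬ pvWD (pvAdjD M) s j goal := by
        intro j hj
        rcases Nat.lt_or_ge j k with hjk | hjk
        · exact h3 j hjk
        · have hjeq : j = k := by omega
          subst hjeq
          intro hW
          exact hgl ((PySem.Set.contains_iff _ _).2 ((hre goal).2 hW))
      have := ih (pvB_expand (pvB_nbrs M) reach frontier).1
        (pvB_expand (pvB_nbrs M) reach frontier).2 (k+1) (by omega) (fun v => hre v)
        (fun v => hnw v) h3'
      constructor
      · intro d hd
        rcases this.1 d hd with ⟨ha, hb, hc, hmin⟩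
        exact ⟨by omega, by omega, hc, hmin⟩
      · intro hnone j hj
        exact this.2 hnone j (by omega)

-- 9. dfs success at depth d ↔ a walk of length ≤ d exists
theorem pv_dfs_iff_WD (M : List (List Int)) (s goal : Int) (d : Nat) :
    (pvA_dfs (pvAdjD M) goal d s PySem.Set.empty).isSome ↔ pvWD (pvAdjD M) s d goal := by
  constructor
  · intro h
    rcases Option.isSome_iff_exists.1 h with ⟨p, hp⟩
    rcases pv_dfs_sound (pvAdjD M) goal d s PySem.Set.empty p hp with
      ⟨l, _, hch, hlast, hlen, _, _⟩
    exact ⟨l, hch, hlast, hlen⟩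
  · rintro ⟨l, hch, hlast, hlen⟩
    rcases pv_extract (pvRd (pvAdjD M)) l.length l s (Nat.le_refl _) hch with
      ⟨l', hch', hlast', hlen', hnd'⟩
    exact pv_dfs_complete (pvAdjD M) goal l' d s PySem.Set.empty hch'
      (hlast'.trans hlast) (hlen'.trans hlen) hnd'
      (fun x _ => (pv_contains_false PySem.Set.empty x).2 (by simp [PySem.Set.empty]))

-- 10. dfsCheck is complete: a simple walk start → goal makes it return true
theorem pv_check_complete (adj : PySem.Dict Int (List (Int × Int))) (goal : Int)
    (U : List Int) (hU : ∀ z : Int, ∀ p ∈ adj.getD z [], p.1 ∈ U) :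
    ∀ (visited : PySem.Set Int) (stack : List Int) (hs : ∀ x ∈ stack, x ∈ U),
      (∃ x ∈ stack, ∃ l : List Int, pvChain (pvRd adj) x l ∧ pvLast x l = goal ∧
        (x :: l).Nodup ∧ ∀ y ∈ l, PySem.Set.contains visited y = false) →
      pvA_dfsCheckAux adj goal U hU visited stack hs = true := by
  intro visited stack hs
  induction visited, stack, hs using pvA_dfsCheckAux.induct adj goal U hU with
  | case1 visited hs =>
    intro hex
    rcases hex with ⟨x, hx, _⟩
    cases hx
  | case2 visited stack hs hne node hgoal =>
    intro _
    rw [pvA_dfsCheckAux, dif_neg hne]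
    rw [if_pos (show stack.getLast hne = goal from hgoal)]
  | case3 visited stack hs hne node hgoal ih =>
    intro hex
    rw [pvA_dfsCheckAux, dif_neg hne]
    rw [if_neg (show ¬ stack.getLast hne = goal from hgoal)]
    apply ih
    rcases hex with ⟨x, hxstack, l, hch, hlast, hnd, hav⟩
    by_cases hzin : stack.getLast hne ∈ x :: l
    · -- the popped node lies on the witness walk: continue from it
      rcases List.append_of_mem hzin with ⟨pre, suf, hsplit⟩
      have hz : pvChain (pvRd adj) (stack.getLast hne) suf ∧
          pvLast (stack.getLast hne) suf = goal ∧ (∀ y ∈ suf, y ∈ l) ∧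
          (stack.getLast hne :: suf).Nodup := by
        cases pre with
        | nil =>
          simp only [List.nil_append, List.cons.injEq] at hsplit
          obtain ⟨hx1, hl1⟩ := hsplit
          subst hl1
          rw [← hx1]
          exact ⟨hch, hlast, fun y hy => hy, hnd⟩
        | cons p0 pre' =>
          simp only [List.cons_append, List.cons.injEq] at hsplit
          obtain ⟨hx1, hl1⟩ := hsplit
          subst hl1
          rw [pvChain_append] at hch
          rw [pvLast_append] at hlast
          refine ⟨hch.2.2, hlast, ?_, ?_⟩
          · intro y hy
            exact List.mem_append.2 (Or.inr (List.mem_cons_of_mem _ hy))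
          · have hsuf : List.IsSuffix (stack.getLast hne :: suf)
                (x :: (pre' ++ stack.getLast hne :: suf)) := ⟨x :: pre', by simp⟩
            exact hsuf.sublist.nodup hnd
      rcases hz with ⟨hchz, hlastz, hsubl, hndz⟩
      cases suf with
      | nil => exact absurd (hlastz : stack.getLast hne = goal) hgoal
      | cons w suf' =>
        have hRzw : pvRd adj (stack.getLast hne) w := hchz.1
        have hwl : w ∈ l := hsubl w List.mem_cons_self
        have hzw : stack.getLast hne ≠ w := by
          have hz1 := (List.nodup_cons.1 hndz).1
          exact fun he => hz1 (he ▸ List.mem_cons_self)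
        have hcw : PySem.Set.contains (PySem.Set.add visited (stack.getLast hne)) w = false := by
          rw [pv_contains_false]
          intro hm
          rcases (PySem.Set.mem_add _ _ _).1 hm with hm' | he
          · have hc := hav w hwl
            rw [(PySem.Set.contains_iff _ _).2 hm'] at hc
            cases hc
          · exact hzw he.symm
        rcases List.mem_map.1 hRzw with ⟨pr, hpr, hfst⟩
        have hwpush : w ∈ ((adj.getD (stack.getLast hne) []).filter
            (fun p => !PySem.Set.contains (PySem.Set.add visited (stack.getLast hne)) p.1)).map
              Prod.fst := by
          refine List.mem_map.2 ⟨pr, List.mem_filter.2 ⟨hpr, ?_⟩, hfst⟩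
          rw [hfst, hcw]
          rfl
        refine ⟨w, List.mem_append.2 (Or.inr hwpush), suf', hchz.2,
          (hlastz : pvLast w suf' = goal), (List.nodup_cons.1 hndz).2, ?_⟩
        intro y hy
        rw [pv_contains_false]
        intro hm
        rcases (PySem.Set.mem_add _ _ _).1 hm with hm' | he
        · have hc := hav y (hsubl y (List.mem_cons_of_mem _ hy))
          rw [(PySem.Set.contains_iff _ _).2 hm'] at hc
          cases hc
        · apply (List.nodup_cons.1 hndz).1
          apply List.mem_cons_of_mem w
          rw [show stack.getLast hne = y from he.symm]
          exact hy
    · -- the popped node is not on the walk: the same witness survives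
      have hxz : x ≠ stack.getLast hne := fun he => hzin (he ▸ List.mem_cons_self)
      have hxdrop : x ∈ stack.dropLast := by
        have h2 : x ∈ stack.dropLast ++ [stack.getLast hne] := by
          rw [List.dropLast_concat_getLast hne]
          exact hxstack
        rcases List.mem_append.1 h2 with h | h
        · exact h
        · exact absurd (List.mem_singleton.1 h) hxz
      refine ⟨x, List.mem_append.2 (Or.inl hxdrop), l, hch, hlast, hnd, ?_⟩
      intro y hy
      rw [pv_contains_false]
      intro hm
      rcases (PySem.Set.mem_add _ _ _).1 hm with hm' | he
      · have hc := hav y hy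
        rw [(PySem.Set.contains_iff _ _).2 hm'] at hc
        cases hc
      · apply hzin
        apply List.mem_cons_of_mem x
        rw [show stack.getLast hne = y from he.symm]
        exact hy

-- 11. main equality
theorem pv_main (M : List (List Int)) (s g : Int)
    (hpre : Pre_get_ids_path M s g) :
    get_ids_path M s g = get_ids_path_alt M s g := by
  obtain ⟨hne, _⟩ := hpre
  by_cases hsg : s = g
  · simp [get_ids_path, get_ids_path_alt, hsg]
  · have hn1 : 0 < M.length := List.length_pos_of_ne_nil hne
    have h1 : ∀ v : Int, v ∈ (PySem.Set.add PySem.Set.empty s) ↔ pvWD (pvAdjD M) s (1-1) v := by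
      intro v
      rw [show (1-1 : Nat) = 0 from rfl, pvWD_zero]
      show v ∈ [s] ↔ v = s
      simp
    have h2 : ∀ v : Int, v ∈ [s] ↔
        (pvWD (pvAdjD M) s (1-1) v ∧ ∀ j < 1-1, ¬ pvWD (pvAdjD M) s j v) := by
      intro v
      rw [show (1-1 : Nat) = 0 from rfl, pvWD_zero]
      simp
    have h3 : ∀ j < 1, ¬ pvWD (pvAdjD M) s j g := by
      intro j hj
      have hj0 : j = 0 := by omega
      subst hj0
      rw [pvWD_zero]
      exact fun he => hsg he.symm
    have hspec := pv_findDepth_spec M s g (M.length - 1)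
      (PySem.Set.add PySem.Set.empty s) [s] 1 (Nat.le_refl 1) h1 h2 h3
    rcases hB : pvB_findDepth (pvB_nbrs M) g (M.length - 1)
        (PySem.Set.add PySem.Set.empty s) [s] 1 with _ | d
    · -- B found no path within depth n-1: both return []
      have hall : ∀ j, j < M.length → ¬ pvWD (pvAdjD M) s j g := by
        intro j hj
        exact hspec.2 hB j (by omega)
      have hids : pvA_ids (pvAdjD M) s g ((M.length : Int) - 1) = none := by
        unfold pvA_ids
        rw [show ((M.length : Int) - 1) + 1 = (M.length : Int) by ring]
        rw [List.findSome?_eq_none_iff]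
        intro x hx
        rcases PySem.List.mem_pyRange_one.1 hx with ⟨hx0, hx1⟩
        have hn : ¬ (pvA_dfs (pvAdjD M) g x.toNat s PySem.Set.empty).isSome = true := by
          rw [pv_dfs_iff_WD]
          exact hall x.toNat (by omega)
        rcases h' : pvA_dfs (pvAdjD M) g x.toNat s PySem.Set.empty with _ | p
        · rfl
        · rw [h'] at hn
          simp at hn
      simp only [get_ids_path, get_ids_path_alt, if_neg hsg]
      rw [show pvA_buildAdj M (M.length : Int)
        (((PySem.List.pyGet? M 0).getD []).length : Int) = pvAdjD M from rfl]
      rw [hB, hids]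
      by_cases hc : pvA_dfsCheck (pvAdjD M) s g = false <;> simp [hc]
    · -- B found the minimal depth d: both return the dfs path at depth d
      rcases hspec.1 d hB with ⟨hd1, hdub, hWD, hmin⟩
      have hdlen : d < M.length := by omega
      have hdls : pvB_dls (pvB_nbrs M) g d s [] =
          pvA_dfs (pvAdjD M) g d s PySem.Set.empty := by
        rw [pv_dls_eq M g d s [],
          show PySem.Set.ofList ([] : List Int) = PySem.Set.empty from rfl]
        cases pvA_dfs (pvAdjD M) g d s PySem.Set.empty <;> simp
      have hFsome : (pvA_dfs (pvAdjD M) g d s PySem.Set.empty).isSome :=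
        (pv_dfs_iff_WD M s g d).2 hWD
      rcases Option.isSome_iff_exists.1 hFsome with ⟨p, hp⟩
      have hids : pvA_ids (pvAdjD M) s g ((M.length : Int) - 1) = some p := by
        unfold pvA_ids
        rw [show ((M.length : Int) - 1) + 1 = (M.length : Int) by ring]
        rw [PySem.List.pyRange_one_append 0 (d : Int) (M.length : Int) (by omega) (by omega)]
        rw [List.findSome?_append]
        have h1st : List.findSome?
            (fun x => pvA_dfs (pvAdjD M) g x.toNat s PySem.Set.empty)
            (PySem.List.pyRange 0 (d : Int) 1) = none := by
          rw [List.findSome?_eq_none_iff]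
          intro x hx
          rcases PySem.List.mem_pyRange_one.1 hx with ⟨hx0, hx1⟩
          have hn : ¬ (pvA_dfs (pvAdjD M) g x.toNat s PySem.Set.empty).isSome = true := by
            rw [pv_dfs_iff_WD]
            exact hmin x.toNat (by omega)
          rcases h' : pvA_dfs (pvAdjD M) g x.toNat s PySem.Set.empty with _ | q
          · rfl
          · rw [h'] at hn
            simp at hn
        rw [h1st]
        rw [PySem.List.pyRange_one_cons (show (d : Int) < (M.length : Int) by omega)]
        simp only [Option.none_or, List.findSome?_cons, Int.toNat_natCast, hp]
      have hcheck : pvA_dfsCheck (pvAdjD M) s g = true := by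
        rcases pv_dfs_sound (pvAdjD M) g d s PySem.Set.empty p hp with
          ⟨l, _, hch, hlast, _, hnd, _⟩
        unfold pvA_dfsCheck
        apply pv_check_complete
        exact ⟨s, List.mem_singleton.2 rfl, l, hch, hlast, hnd,
          fun y _ => (pv_contains_false PySem.Set.empty y).2 (by simp [PySem.Set.empty])⟩
      have hAval : get_ids_path M s g = p := by
        simp only [get_ids_path, if_neg hsg]
        rw [show pvA_buildAdj M (M.length : Int)
          (((PySem.List.pyGet? M 0).getD []).length : Int) = pvAdjD M from rfl]
        simp [hcheck, hids]
      have hBval : get_ids_path_alt M s g = p := by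
        simp only [get_ids_path_alt, if_neg hsg]
        rw [hB]
        show (match pvB_dls (pvB_nbrs M) g d s [] with
          | some p => p
          | none => []) = p
        rw [hdls, hp]
      rw [hAval, hBval]

-- ===== VERDICT (by name: the statement is the Claim_ definition above) =====
theorem get_ids_path_spec : Claim_equal_get_ids_path := by
  intro adj_matrix start_node goal_node _ hpre
  unfold Spec_get_ids_path
  exact pv_main adj_matrix start_node goal_node hpre
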